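-- pv_equiv track=rewrite | github.com/Mhmd-Hisham/Introduction-to-Python-Scripting | 3- Python Data Analysis/quiz2.py | matrix_trace
-- ===== SOURCE A (Python) =====
-- def matrix_trace(matrix):
--     trace = 0
--     NUM_ROWS = len(matrix)
--     NUM_COLS = len(matrix[0])
--
--     for row in range(NUM_ROWS):
--         for col in range(NUM_COLS):
--             if col == row:
--                 trace += matrix[row][col]
--
--     return trace
-- ===== SOURCE B (Python) =====
-- def matrix_trace(matrix):
--     # Sum the diagonal directly: one pass over min(rows, cols) entries.
--     return sum(row[i] for i, row in enumerate(matrix[:len(matrix[0])]))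
-- ===== Notes on version B (the rewrite author's own statement) =====
-- stated objective: alternative
-- what changed: Replaced the O(rows*cols) double loop that tests col == row at every cell with a single direct pass summing row[i] over the first min(rows, cols) rows.
import Mathlib
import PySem

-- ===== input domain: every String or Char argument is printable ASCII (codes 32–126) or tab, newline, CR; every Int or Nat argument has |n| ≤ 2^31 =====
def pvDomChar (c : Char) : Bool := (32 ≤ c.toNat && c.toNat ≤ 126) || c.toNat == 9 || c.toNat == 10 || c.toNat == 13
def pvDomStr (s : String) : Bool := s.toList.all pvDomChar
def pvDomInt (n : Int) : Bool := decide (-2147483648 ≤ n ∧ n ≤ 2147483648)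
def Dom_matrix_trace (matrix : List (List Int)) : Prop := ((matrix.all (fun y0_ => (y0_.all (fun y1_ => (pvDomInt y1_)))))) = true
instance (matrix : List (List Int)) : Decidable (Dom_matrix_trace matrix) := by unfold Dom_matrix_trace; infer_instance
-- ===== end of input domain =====

-- B sums the diagonal in one direct pass over min(rows, cols) entries instead of A's row×col double scan (objective: alternative).

-- ===== PORT A =====
-- literal port of A's double loop; pyGet? = Python indexing, `none` (IndexError) is excluded by Pre_, read through .getD
def matrix_trace (matrix : List (List Int)) : Int :=
  (PySem.List.pyRange 0 (matrix.length : Int) 1).foldl (fun trace row =>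
    (PySem.List.pyRange 0 (((PySem.List.pyGet? matrix 0).getD []).length : Int) 1).foldl (fun trace col =>
      if col = row then
        trace + ((PySem.List.pyGet? ((PySem.List.pyGet? matrix row).getD []) col).getD 0)
      else trace) trace) 0

-- ===== PORT B =====
-- port of Source B: sum(row[i] for i, row in enumerate(matrix[:len(matrix[0])]))
def matrix_trace_alt (matrix : List (List Int)) : Int :=
  ((PySem.List.enumerate (PySem.List.slice matrix none (some (((PySem.List.pyGet? matrix 0).getD []).length : Int)))).map
    (fun p => (PySem.List.pyGet? p.2 p.1).getD 0)).sum

-- ===== PRECONDITION & SPEC =====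
-- Pre_ excludes exactly the inputs where A (and B alike) raises IndexError: the empty
-- matrix (len(matrix[0])), and matrices whose i-th row has ≤ i entries for some
-- diagonal position i < min(rows, cols).
def Pre_matrix_trace (matrix : List (List Int)) : Prop :=
  matrix ≠ [] ∧
  ∀ i : Nat, i < min matrix.length (matrix.headD []).length → i < (matrix.getD i []).length
instance (matrix : List (List Int)) : Decidable (Pre_matrix_trace matrix) := by
  unfold Pre_matrix_trace; infer_instance
def pvWitness_matrix_trace : List (List Int) := [[1, 2], [3, 4]]

def Spec_matrix_trace (matrix : List (List Int)) (out : Int) : Prop := out = matrix_trace_alt matrix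
instance (matrix : List (List Int)) (out : Int) : Decidable (Spec_matrix_trace matrix out) := by unfold Spec_matrix_trace; infer_instance

-- ===== CLAIM (what is proved, stated in full; the proofs are below) =====
def Claim_equal_matrix_trace : Prop := ∀ (matrix : List (List Int)), Dom_matrix_trace matrix → Pre_matrix_trace matrix → Spec_matrix_trace matrix (matrix_trace matrix)

-- ===== LEMMAS AND PROOFS =====

-- A's inner column loop adds matrix[row][row] exactly once (when row < NUM_COLS), else nothing.
theorem pv_inner (m : Nat) (row t : Int) (v : Int → Int) :
    (PySem.List.pyRange 0 m 1).foldl (fun acc col => if col = row then acc + v col else acc) t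
      = t + (if 0 ≤ row ∧ row < (m : Int) then v row else 0) := by
  induction m generalizing t with
  | zero => simp [PySem.List.pyRange_one_eq_nil]
  | succ k ih =>
    rw [show ((k + 1 : Nat) : Int) = (k : Int) + 1 from by push_cast; ring,
        PySem.List.pyRange_one_succ_right (by positivity), List.foldl_append]
    simp only [List.foldl_cons, List.foldl_nil]
    rw [ih]
    by_cases h : (k : Int) = row
    · rw [if_pos h, if_neg (show ¬((0:Int) ≤ row ∧ row < (k : Int)) by omega),
          if_pos (show (0:Int) ≤ row ∧ row < (k : Int) + 1 by omega), h]
      ring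
    · rw [if_neg h]
      by_cases h2 : (0:Int) ≤ row ∧ row < (k : Int)
      · rw [if_pos h2, if_pos ⟨h2.1, by omega⟩]
      · rw [if_neg h2, if_neg (show ¬((0:Int) ≤ row ∧ row < (k : Int) + 1) by omega)]

-- the enumerate-sum of B, unrolled to an index sum
theorem pv_enum_sum (xs : List (List Int)) (k : Nat) :
    ((PySem.List.enumerate xs (k : Int)).map (fun p => (PySem.List.pyGet? p.2 p.1).getD 0)).sum
      = ((List.range xs.length).map (fun j => ((xs.getD j []).getD (k + j) 0))).sum := by
  induction xs generalizing k with
  | nil => simp [PySem.List.enumerate]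
  | cons r t ih =>
    simp only [PySem.List.enumerate, List.map_cons, List.sum_cons, List.length_cons,
      List.range_succ_eq_map, List.map_map]
    rw [show (k : Int) + 1 = ((k + 1 : Nat) : Int) from by push_cast; ring, ih]
    congr 1
    · simp [PySem.List.pyGet?_natCast, List.getD]
    · congr 1
      apply List.map_congr_left
      intro j _
      simp only [Function.comp, Nat.succ_eq_add_one, List.getD_cons_succ]
      have h : k + 1 + j = k + (j + 1) := by omega
      rw [h]

-- truncating the 0/ite sum at m
theorem pv_sum_trunc (n m : Nat) (f : Nat → Int) :
    ((List.range n).map (fun i => if i < m then f i else 0)).sum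
      = ((List.range (min n m)).map f).sum := by
  induction n with
  | zero => simp
  | succ k ih =>
    rw [List.range_succ, List.map_append, List.sum_append, ih]
    by_cases h : k < m
    · rw [show min (k + 1) m = min k m + 1 by omega, List.range_succ, List.map_append,
          List.sum_append]
      simp [if_pos h, show min k m = k by omega]
    · rw [show min (k + 1) m = min k m by omega]
      simp [if_neg h]

theorem pv_A_sum (matrix : List (List Int)) :
    matrix_trace matrix
      = ((List.range matrix.length).map (fun i =>
          if i < (matrix.headD []).length then ((matrix.getD i []).getD i 0) else 0)).sum := by
  have hA : matrix_trace matrix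
      = (PySem.List.pyRange 0 (matrix.length : Int) 1).foldl (fun trace row =>
          (PySem.List.pyRange 0 (((PySem.List.pyGet? matrix 0).getD []).length : Int) 1).foldl
            (fun trace col =>
              if col = row then
                trace + ((PySem.List.pyGet? ((PySem.List.pyGet? matrix row).getD []) col).getD 0)
              else trace) trace) 0 := rfl
  rw [hA]
  rw [PySem.List.foldl_congr_mem _ _
        (fun trace row =>
          trace + (if (0:Int) ≤ row ∧ row < ((((PySem.List.pyGet? matrix 0).getD []).length : Nat) : Int)
            then ((PySem.List.pyGet? ((PySem.List.pyGet? matrix row).getD []) row).getD 0) else 0)) 0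
        (fun trace row _ => pv_inner _ _ _ _)]
  rw [PySem.List.pyRange_zero_nat, List.foldl_map, PySem.List.foldl_add, zero_add]
  refine congrArg List.sum (List.map_congr_left ?_)
  intro i _
  simp only [PySem.List.pyGet?_natCast, PySem.List.pyGet?_zero]
  by_cases h : i < (matrix.headD []).length
  · rw [if_pos ⟨by positivity, by
        simpa [List.headD_eq_head?_getD, List.head?_eq_getElem?] using h⟩, if_pos h]
    simp [List.getD]
  · rw [if_neg (by
        simp only [List.headD_eq_head?_getD, List.head?_eq_getElem?] at h
        omega), if_neg h]

-- B's enumerate-sum starting at 0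
theorem pv_enum_sum0 (xs : List (List Int)) :
    ((PySem.List.enumerate xs 0).map (fun p => (PySem.List.pyGet? p.2 p.1).getD 0)).sum
      = ((List.range xs.length).map (fun j => ((xs.getD j []).getD j 0))).sum := by
  simpa using pv_enum_sum xs 0

-- ===== VERDICT (by name: the statement is the Claim_ definition above) =====
theorem matrix_trace_spec : Claim_equal_matrix_trace := by
  intro matrix _ hpre
  obtain ⟨hne, -⟩ := hpre
  have hm : ((PySem.List.pyGet? matrix 0).getD []).length = (matrix.headD []).length := by
    cases matrix with
    | nil => exact absurd rfl hne
    | cons r t => simp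
  unfold Spec_matrix_trace matrix_trace_alt
  rw [pv_A_sum, PySem.List.slice_to_natCast, pv_enum_sum0, List.length_take,
      pv_sum_trunc, Nat.min_comm, hm]
  refine congrArg List.sum (List.map_congr_left ?_)
  intro j hj
  simp only [List.mem_range] at hj
  have hjm : j < (matrix.headD []).length := Nat.lt_of_lt_of_le hj (Nat.min_le_left _ _)
  have hjm' : j < (matrix.head?.getD []).length := by
    simpa [List.headD_eq_head?_getD] using hjm
  congr 1
  simp [List.getD, hjm']
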